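-- pv_equiv track=rewrite | github.com/elehman16/discq | src/t0_code/prepare_data_for_t0.py | extract_sentence_with_trigger
-- ===== SOURCE A (Python) =====
-- def extract_sentence_with_trigger(
--     doc_text, trigger_span, expected_trigger_text=None, n_prior_sentences=0, n_future_sentences=0, doc_id=None
-- ):
--     """
--     Extracts the sentence with the trigger.
--
--     If expected_trigger_text is not None,
--         checks if the trigger is the expected_trigger_text and tries to find it in the neighboring sentences (plus minus 20 sentences).
--         If the trigger is not found, raises RuntimeError.
--
--     Args:
--         n_future_sentences: Number of sentences to extract after the trigger.
--         n_prior_sentences: Number of sentences to extract before the trigger.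
--     """
--     doc_sentences = doc_text.splitlines(keepends=True)
--     # doc_sentences = [t for t in doc_text.split("\n") if len(t) > 0]
--     sentence_lengths = [len(s) for s in doc_sentences]
--
--     current_index = 0
--     sentence_index = None
--     for i, l in enumerate(sentence_lengths):
--         if trigger_span[0] <= current_index + l:
--             sentence_index = i
--             break
--         current_index += l
--
--     if sentence_index is None:
--         raise Exception("Could not find sentence with trigger by span")
--
--     if expected_trigger_text is not None:
--         if expected_trigger_text not in doc_sentences[sentence_index]:
--             # Try to find the trigger in the neighboring sentences
--             for i in range(1, 20):
--                 if sentence_index - i >= 0 and expected_trigger_text in doc_sentences[sentence_index - i]: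
--                     sentence_index = sentence_index - i
--                     break
--                 if (
--                     sentence_index + i < len(doc_sentences)
--                     and expected_trigger_text in doc_sentences[sentence_index + i]
--                 ):
--                     sentence_index = sentence_index + i
--                     break
--             else:
--                 raise RuntimeError(
--                     f"Could not find expected trigger text {expected_trigger_text} in the document with name {doc_id}"
--                 )
--
--     sentence_index_start = max(0, sentence_index - n_prior_sentences)
--     sentence_index_end = min(len(doc_sentences), sentence_index + n_future_sentences + 1)
--     sentence = " ".join(doc_sentences[sentence_index_start:sentence_index_end])
--     return sentence
-- ===== SOURCE B (Python) =====
-- import bisect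
-- import itertools
--
--
-- def extract_sentence_with_trigger(
--     doc_text, trigger_span, expected_trigger_text=None, n_prior_sentences=0, n_future_sentences=0, doc_id=None
-- ):
--     """Prefix-sum + bisect re-implementation: locate the sentence whose cumulative
--     end offset first reaches trigger_span[0] by binary search instead of a manual
--     running-total scan, and search the neighbourhood via one flattened candidate
--     stream instead of a paired-guard loop."""
--     sentences = doc_text.splitlines(keepends=True)
--     ends = list(itertools.accumulate(map(len, sentences)))
--     idx = bisect.bisect_left(ends, trigger_span[0])
--     if idx == len(sentences):
--         raise Exception("Could not find sentence with trigger by span")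
--
--     if expected_trigger_text is not None and expected_trigger_text not in sentences[idx]:
--         found = next(
--             (
--                 j
--                 for i in range(1, 20)
--                 for j in (idx - i, idx + i)
--                 if 0 <= j < len(sentences) and expected_trigger_text in sentences[j]
--             ),
--             None,
--         )
--         if found is None:
--             raise RuntimeError(
--                 f"Could not find expected trigger text {expected_trigger_text} in the document with name {doc_id}"
--             )
--         idx = found
--
--     start = max(0, idx - n_prior_sentences)
--     end = min(len(sentences), idx + n_future_sentences + 1)
--     return " ".join(sentences[start:end])
-- ===== Notes on version B (the rewrite author's own statement) =====
-- stated objective: alternative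
-- what changed: Replaces the manual running-total scan for the trigger sentence by a prefix-sum table of cumulative sentence ends queried with bisect_left, and replaces the paired-guard neighbour loop by a single flattened candidate stream consumed with next().
import Mathlib
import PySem

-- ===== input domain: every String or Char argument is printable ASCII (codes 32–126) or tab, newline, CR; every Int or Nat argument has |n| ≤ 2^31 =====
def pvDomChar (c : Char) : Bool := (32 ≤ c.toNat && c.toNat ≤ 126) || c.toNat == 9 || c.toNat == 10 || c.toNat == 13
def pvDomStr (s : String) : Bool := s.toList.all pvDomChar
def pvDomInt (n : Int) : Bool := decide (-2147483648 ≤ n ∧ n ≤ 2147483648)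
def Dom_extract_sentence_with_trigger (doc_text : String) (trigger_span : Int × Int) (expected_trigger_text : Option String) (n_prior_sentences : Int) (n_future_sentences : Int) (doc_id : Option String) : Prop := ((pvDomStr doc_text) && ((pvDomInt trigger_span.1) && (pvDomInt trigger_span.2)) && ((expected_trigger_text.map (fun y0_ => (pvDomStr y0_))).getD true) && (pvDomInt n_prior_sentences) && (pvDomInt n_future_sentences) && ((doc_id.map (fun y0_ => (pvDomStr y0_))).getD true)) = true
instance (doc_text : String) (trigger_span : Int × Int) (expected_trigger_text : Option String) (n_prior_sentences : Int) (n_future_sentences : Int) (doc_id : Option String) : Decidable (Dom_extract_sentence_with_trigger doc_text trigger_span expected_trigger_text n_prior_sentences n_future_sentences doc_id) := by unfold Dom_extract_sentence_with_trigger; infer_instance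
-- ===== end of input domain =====

-- B replaces A's running-total scan by a prefix-sum table queried with bisect_left and
-- flattens the neighbour search into one candidate stream (objective: alternative, same cost).
-- Equality is about the return value; neither program mutates its arguments.

-- Shared primitive: Python's str.splitlines(keepends=True), ported by hand (PySem.Str.splitlines
-- drops the line ends).  Exact on the stated domain, whose only line breaks are '\n', '\r', '\r\n'.
def splitKeep (acc : List Char) : List Char → List (List Char)
  | [] => if acc = [] then [] else [acc.reverse]
  | '\r' :: '\n' :: rest => (acc.reverse ++ ['\r', '\n']) :: splitKeep [] rest
  | '\r' :: rest => (acc.reverse ++ ['\r']) :: splitKeep [] rest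
  | '\n' :: rest => (acc.reverse ++ ['\n']) :: splitKeep [] rest
  | c :: rest => splitKeep (c :: acc) rest

-- ===== PORT A =====

-- A's scan: first index i with trigger_span[0] <= current_index + l, running total in cur.
def loopA (k : Int) : List Int → Int → Int → Option Int
  | [], _, _ => none
  | l :: rest, cur, i => if k ≤ cur + l then some i else loopA k rest (cur + l) (i + 1)

-- A's neighbour loop over range(1, 20): check idx-i (if in range) then idx+i (if in range).
def searchA (ss : List (List Char)) (t : List Char) (si : Int) : List Int → Option Int
  | [] => none
  | i :: rest =>
      if 0 ≤ si - i ∧ PySem.Chars.isIn t ((PySem.List.pyGet? ss (si - i)).getD []) then some (si - i)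
      else if si + i < (ss.length : Int) ∧ PySem.Chars.isIn t ((PySem.List.pyGet? ss (si + i)).getD []) then some (si + i)
      else searchA ss t si rest

def extract_sentence_with_trigger (doc_text : String) (trigger_span : Int × Int) (expected_trigger_text : Option String) (n_prior_sentences : Int) (n_future_sentences : Int) (doc_id : Option String) : String :=
  let doc_sentences := splitKeep [] doc_text.toList
  let sentence_lengths : List Int := doc_sentences.map (fun s => (s.length : Int))
  match loopA trigger_span.1 sentence_lengths 0 0 with
  | none => ""            -- Python: raise Exception (excluded by Pre_)
  | some si =>
    let si? : Option Int :=
      match expected_trigger_text with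
      | none => some si
      | some t =>
        if PySem.Chars.isIn t.toList ((PySem.List.pyGet? doc_sentences si).getD []) then some si
        else searchA doc_sentences t.toList si (PySem.List.pyRange 1 20 1)
    match si? with
    | none => ""          -- Python: raise RuntimeError (excluded by Pre_)
    | some si =>
      let s := max 0 (si - n_prior_sentences)
      let e := min ((doc_sentences.length : Int)) (si + n_future_sentences + 1)
      String.mk (PySem.Chars.join [' '] (PySem.List.slice doc_sentences (some s) (some e)))

-- ===== PORT B =====

-- itertools.accumulate(map(len, sentences)): cumulative end offsets.
def accumB (t : Int) : List Int → List Int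
  | [] => []
  | x :: xs => (t + x) :: accumB (t + x) xs

def extract_sentence_with_trigger_alt (doc_text : String) (trigger_span : Int × Int) (expected_trigger_text : Option String) (n_prior_sentences : Int) (n_future_sentences : Int) (doc_id : Option String) : String :=
  let sentences := splitKeep [] doc_text.toList
  let ends := accumB 0 (sentences.map (fun s => (s.length : Int)))
  let idx := PySem.List.bisectLeft ends trigger_span.1
  if idx = sentences.length then ""       -- Python: raise Exception (excluded by Pre_)
  else
    let idx? : Option Int :=
      match expected_trigger_text with
      | none => some (idx : Int)
      | some t =>
        if PySem.Chars.isIn t.toList ((PySem.List.pyGet? sentences (idx : Int)).getD []) then some (idx : Int)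
        else ((PySem.List.pyRange 1 20 1).flatMap (fun i => [(idx : Int) - i, (idx : Int) + i])).find?
               (fun j => decide (0 ≤ j) && decide (j < (sentences.length : Int)) &&
                         PySem.Chars.isIn t.toList ((PySem.List.pyGet? sentences j).getD []))
    match idx? with
    | none => ""          -- Python: raise RuntimeError (excluded by Pre_)
    | some j =>
      let s := max 0 (j - n_prior_sentences)
      let e := min ((sentences.length : Int)) (j + n_future_sentences + 1)
      String.mk (PySem.Chars.join [' '] (PySem.List.slice sentences (some s) (some e)))

-- ===== PRECONDITION & SPEC =====

-- Pre_ = exactly the inputs on which the Python A returns normally: some sentence's cumulative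
-- end reaches trigger_span[0] (else Exception), and, when an expected trigger text is given, it
-- occurs in some sentence within 19 sentences of the located one (else RuntimeError).
def Pre_extract_sentence_with_trigger (doc_text : String) (trigger_span : Int × Int) (expected_trigger_text : Option String) (n_prior_sentences : Int) (n_future_sentences : Int) (doc_id : Option String) : Prop :=
  let ss := splitKeep [] doc_text.toList
  let idx := (accumB 0 (ss.map (fun s => (s.length : Int)))).countP (fun e => e < trigger_span.1)
  ss ≠ [] ∧ trigger_span.1 ≤ (ss.map (fun s => (s.length : Int))).sum ∧
    (∀ t, expected_trigger_text = some t →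
      ∃ j < ss.length, idx ≤ j + 19 ∧ j ≤ idx + 19 ∧ PySem.Chars.isIn t.toList ss[j]! = true)
instance (doc_text : String) (trigger_span : Int × Int) (expected_trigger_text : Option String) (n_prior_sentences : Int) (n_future_sentences : Int) (doc_id : Option String) : Decidable (Pre_extract_sentence_with_trigger doc_text trigger_span expected_trigger_text n_prior_sentences n_future_sentences doc_id) := by unfold Pre_extract_sentence_with_trigger; infer_instance

def pvWitness_extract_sentence_with_trigger : String × (Int × Int) × Option String × Int × Int × Option String :=
  ("hello\nworld\n", (7, 9), some "wor", 0, 0, none)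

def Spec_extract_sentence_with_trigger (doc_text : String) (trigger_span : Int × Int) (expected_trigger_text : Option String) (n_prior_sentences : Int) (n_future_sentences : Int) (doc_id : Option String) (out : String) : Prop := out = extract_sentence_with_trigger_alt doc_text trigger_span expected_trigger_text n_prior_sentences n_future_sentences doc_id
instance (doc_text : String) (trigger_span : Int × Int) (expected_trigger_text : Option String) (n_prior_sentences : Int) (n_future_sentences : Int) (doc_id : Option String) (out : String) : Decidable (Spec_extract_sentence_with_trigger doc_text trigger_span expected_trigger_text n_prior_sentences n_future_sentences doc_id out) := by unfold Spec_extract_sentence_with_trigger; infer_instance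

-- ===== CLAIM (what is proved, stated in full; the proofs are below) =====
def Claim_equal_extract_sentence_with_trigger : Prop := ∀ (doc_text : String) (trigger_span : Int × Int) (expected_trigger_text : Option String) (n_prior_sentences : Int) (n_future_sentences : Int) (doc_id : Option String), Dom_extract_sentence_with_trigger doc_text trigger_span expected_trigger_text n_prior_sentences n_future_sentences doc_id → Pre_extract_sentence_with_trigger doc_text trigger_span expected_trigger_text n_prior_sentences n_future_sentences doc_id → Spec_extract_sentence_with_trigger doc_text trigger_span expected_trigger_text n_prior_sentences n_future_sentences doc_id (extract_sentence_with_trigger doc_text trigger_span expected_trigger_text n_prior_sentences n_future_sentences doc_id)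

-- ===== LEMMAS AND PROOFS =====

theorem pvWitness_ok :
    Dom_extract_sentence_with_trigger (pvWitness_extract_sentence_with_trigger.1) (pvWitness_extract_sentence_with_trigger.2.1) (pvWitness_extract_sentence_with_trigger.2.2.1) (pvWitness_extract_sentence_with_trigger.2.2.2.1) (pvWitness_extract_sentence_with_trigger.2.2.2.2.1) (pvWitness_extract_sentence_with_trigger.2.2.2.2.2) ∧
    Pre_extract_sentence_with_trigger (pvWitness_extract_sentence_with_trigger.1) (pvWitness_extract_sentence_with_trigger.2.1) (pvWitness_extract_sentence_with_trigger.2.2.1) (pvWitness_extract_sentence_with_trigger.2.2.2.1) (pvWitness_extract_sentence_with_trigger.2.2.2.2.1) (pvWitness_extract_sentence_with_trigger.2.2.2.2.2) := by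
  constructor <;> decide

theorem accumB_length (t : Int) (xs : List Int) : (accumB t xs).length = xs.length := by
  induction xs generalizing t with
  | nil => rfl
  | cons x xs ih => simp [accumB, ih]

theorem accumB_mem_le (t : Int) (xs : List Int) (h : ∀ l ∈ xs, 0 ≤ l) :
    ∀ e ∈ accumB t xs, t ≤ e := by
  induction xs generalizing t with
  | nil => simp [accumB]
  | cons x xs ih =>
    intro e he
    simp only [accumB, List.mem_cons] at he
    rcases he with rfl | he
    · have := h x (by simp); omega
    · have hx := h x (by simp)
      have := ih (t + x) (fun l hl => h l (by simp [hl])) e he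
      omega

theorem accumB_pairwise (t : Int) (xs : List Int) (h : ∀ l ∈ xs, 0 ≤ l) :
    (accumB t xs).Pairwise (· ≤ ·) := by
  induction xs generalizing t with
  | nil => simp [accumB]
  | cons x xs ih =>
    simp only [accumB, List.pairwise_cons]
    exact ⟨accumB_mem_le (t + x) xs (fun l hl => h l (by simp [hl])),
           ih (t + x) (fun l hl => h l (by simp [hl]))⟩

-- A's scan characterised by countP over the prefix-sum table.
theorem loopA_eq_countP (k : Int) (xs : List Int) (t : Int) (i : Int) (h : ∀ l ∈ xs, 0 ≤ l) :
    loopA k xs t i =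
      (if (accumB t xs).countP (fun e => e < k) = xs.length then none
       else some (i + ((accumB t xs).countP (fun e => e < k) : Int))) := by
  induction xs generalizing t i with
  | nil => simp [loopA, accumB]
  | cons x xs ih =>
    simp only [loopA, accumB]
    by_cases hk : k ≤ t + x
    · have hc : ((t + x) :: accumB (t + x) xs).countP (fun e => e < k) = 0 := by
        rw [List.countP_eq_zero]
        intro e he
        simp only [List.mem_cons] at he
        rcases he with rfl | he
        · simpa using not_lt.mpr hk
        · have := accumB_mem_le (t + x) xs (fun l hl => h l (by simp [hl])) e he
          simpa using not_lt.mpr (le_trans hk this)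
      simp [hk, hc]
    · have hx : t + x < k := by omega
      have hc : ((t + x) :: accumB (t + x) xs).countP (fun e => e < k) =
          (accumB (t + x) xs).countP (fun e => e < k) + 1 := by
        rw [List.countP_cons]; simp [hx]
      rw [if_neg hk, ih (t + x) (i + 1) (fun l hl => h l (by simp [hl])), hc]
      have hlen := accumB_length (t + x) xs
      by_cases hl : (accumB (t + x) xs).countP (fun e => e < k) = xs.length
      · simp [hl]
      · have : ¬((accumB (t + x) xs).countP (fun e => e < k) + 1 = xs.length + 1) := by omega
        simp only [List.length_cons, if_neg this, if_neg hl]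
        congr 1
        push_cast
        ring

-- bisect_left on a sorted list = number of elements < the key.
theorem bisectLeft_eq_countP (xs : List Int) (k : Int) (h : xs.Pairwise (· ≤ ·)) :
    PySem.List.bisectLeft xs k = xs.countP (fun e => e < k) := by
  obtain ⟨hle, hlt, hge⟩ := PySem.List.bisectLeft_spec xs k h
  set b := PySem.List.bisectLeft xs k with hb
  have : xs = xs.take b ++ xs.drop b := (List.take_append_drop b xs).symm
  rw [this, List.countP_append]
  have h1 : (xs.take b).countP (fun e => e < k) = (xs.take b).length := by
    rw [List.countP_eq_length]
    intro e he
    obtain ⟨j, hj, rfl⟩ := List.mem_take_iff_getElem.mp he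
    exact decide_eq_true (hlt j (by omega) (by omega))
  have h2 : (xs.drop b).countP (fun e => e < k) = 0 := by
    rw [List.countP_eq_zero]
    intro e he
    obtain ⟨j, hj, hej⟩ := List.getElem_of_mem he
    have hjlen : b + j < xs.length := by
      have := List.length_drop (l := xs) (i := b); omega
    have hx : e = xs[b + j] := by rw [← hej, List.getElem_drop]
    have hge' := hge (b + j) hjlen (by omega)
    rw [← hx] at hge'
    simpa using not_lt.mpr hge'
  rw [h1, h2, List.length_take]
  omega

-- A's neighbour loop = find? over the flattened candidate stream, for positive offsets
-- and an in-range centre.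
theorem searchA_eq_find (ss : List (List Char)) (t : List Char) (si : Int)
    (hlo : 0 ≤ si) (hhi : si < (ss.length : Int)) (is : List Int) (his : ∀ i ∈ is, 1 ≤ i) :
    searchA ss t si is =
      (is.flatMap (fun i => [si - i, si + i])).find?
        (fun j => decide (0 ≤ j) && decide (j < (ss.length : Int)) &&
                  PySem.Chars.isIn t ((PySem.List.pyGet? ss j).getD [])) := by
  induction is with
  | nil => rfl
  | cons i rest ih =>
    have hi : 1 ≤ i := his i (by simp)
    have hneg : si - i < (ss.length : Int) := by omega
    have hpos : 0 ≤ si + i := by omega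
    have ih' := ih (fun j hj => his j (by simp [hj]))
    simp only [searchA, List.flatMap_cons, List.cons_append, List.nil_append]
    by_cases hA1 : 0 ≤ si - i
    · by_cases hB1 : PySem.Chars.isIn t ((PySem.List.pyGet? ss (si - i)).getD []) = true
      · rw [if_pos ⟨hA1, hB1⟩, List.find?_cons_of_pos (by
          simp only [Bool.and_eq_true, decide_eq_true_eq]
          exact ⟨⟨hA1, hneg⟩, hB1⟩)]
      · rw [Bool.not_eq_true] at hB1
        rw [if_neg (fun h => by simp [hB1] at h),
            List.find?_cons_of_neg (by simp [hB1])]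
        by_cases hB2 : si + i < (ss.length : Int) ∧
            PySem.Chars.isIn t ((PySem.List.pyGet? ss (si + i)).getD []) = true
        · rw [if_pos hB2, List.find?_cons_of_pos (by
            simp only [Bool.and_eq_true, decide_eq_true_eq]
            exact ⟨⟨hpos, hB2.1⟩, hB2.2⟩)]
        · rw [if_neg hB2, List.find?_cons_of_neg (by
            by_cases h : si + i < (ss.length : Int)
            · have hb : PySem.Chars.isIn t ((PySem.List.pyGet? ss (si + i)).getD []) = false := by
                rcases Bool.eq_false_or_eq_true
                  (PySem.Chars.isIn t ((PySem.List.pyGet? ss (si + i)).getD [])) with hb | hb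
                · exact absurd ⟨h, hb⟩ hB2
                · exact hb
              simp [hb]
            · intro hcontra
              simp only [Bool.and_eq_true, decide_eq_true_eq] at hcontra
              exact h hcontra.1.2)]
          exact ih'
    · rw [if_neg (fun h => hA1 h.1), List.find?_cons_of_neg (by
        intro hcontra
        simp only [Bool.and_eq_true, decide_eq_true_eq] at hcontra
        exact hA1 hcontra.1.1)]
      by_cases hB2 : si + i < (ss.length : Int) ∧
          PySem.Chars.isIn t ((PySem.List.pyGet? ss (si + i)).getD []) = true
      · rw [if_pos hB2, List.find?_cons_of_pos (by
          simp only [Bool.and_eq_true, decide_eq_true_eq]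
          exact ⟨⟨hpos, hB2.1⟩, hB2.2⟩)]
      · rw [if_neg hB2, List.find?_cons_of_neg (by
          by_cases h : si + i < (ss.length : Int)
          · have hb : PySem.Chars.isIn t ((PySem.List.pyGet? ss (si + i)).getD []) = false := by
              rcases Bool.eq_false_or_eq_true
                (PySem.Chars.isIn t ((PySem.List.pyGet? ss (si + i)).getD [])) with hb | hb
              · exact absurd ⟨h, hb⟩ hB2
              · exact hb
            simp [hb]
          · intro hcontra
            simp only [Bool.and_eq_true, decide_eq_true_eq] at hcontra
            exact h hcontra.1.2)]
        exact ih'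

-- The whole body of both programs, over an arbitrary sentence list: A's scan+loop pipeline
-- equals B's bisect+find? pipeline (unconditionally; both raise-branches yield "").
theorem pv_core (ss : List (List Char)) (k : Int) (expected : Option String)
    (n_prior n_future : Int) :
    (match loopA k (ss.map (fun s => ((s.length : Int)))) 0 0 with
     | none => ""
     | some si =>
       match (match expected with
         | none => some si
         | some t =>
           if PySem.Chars.isIn t.toList ((PySem.List.pyGet? ss si).getD []) then some si
           else searchA ss t.toList si (PySem.List.pyRange 1 20 1)) with
       | none => ""
       | some si =>
         String.mk (PySem.Chars.join [' '] (PySem.List.slice ss (some (max 0 (si - n_prior)))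
           (some (min ((ss.length : Int)) (si + n_future + 1)))))) =
    (if PySem.List.bisectLeft (accumB 0 (ss.map (fun s => ((s.length : Int))))) k = ss.length then ""
     else
       match (match expected with
         | none => some (((PySem.List.bisectLeft (accumB 0 (ss.map (fun s => ((s.length : Int))))) k) : Int))
         | some t =>
           if PySem.Chars.isIn t.toList ((PySem.List.pyGet? ss (((PySem.List.bisectLeft (accumB 0 (ss.map (fun s => ((s.length : Int))))) k) : Int))).getD []) then some (((PySem.List.bisectLeft (accumB 0 (ss.map (fun s => ((s.length : Int))))) k) : Int))
           else ((PySem.List.pyRange 1 20 1).flatMap (fun i => [(((PySem.List.bisectLeft (accumB 0 (ss.map (fun s => ((s.length : Int))))) k) : Int)) - i, (((PySem.List.bisectLeft (accumB 0 (ss.map (fun s => ((s.length : Int))))) k) : Int)) + i])).find?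
                  (fun j => decide (0 ≤ j) && decide (j < (ss.length : Int)) &&
                            PySem.Chars.isIn t.toList ((PySem.List.pyGet? ss j).getD []))) with
       | none => ""
       | some j =>
         String.mk (PySem.Chars.join [' '] (PySem.List.slice ss (some (max 0 (j - n_prior)))
           (some (min ((ss.length : Int)) (j + n_future + 1)))))) := by
  have hnn : ∀ l ∈ ss.map (fun s => ((s.length : Int))), 0 ≤ l := by
    intro l hl
    rw [List.mem_map] at hl
    obtain ⟨s, _, rfl⟩ := hl
    positivity
  have hsorted : (accumB 0 (ss.map (fun s => ((s.length : Int))))).Pairwise (· ≤ ·) :=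
    accumB_pairwise 0 _ hnn
  have hbis : PySem.List.bisectLeft (accumB 0 (ss.map (fun s => ((s.length : Int))))) k =
      (accumB 0 (ss.map (fun s => ((s.length : Int))))).countP (fun e => e < k) :=
    bisectLeft_eq_countP _ k hsorted
  have hlenE : (accumB 0 (ss.map (fun s => ((s.length : Int))))).length = ss.length := by
    rw [accumB_length, List.length_map]
  have hloop := loopA_eq_countP k (ss.map (fun s => ((s.length : Int)))) 0 0 hnn
  set c := (accumB 0 (ss.map (fun s => ((s.length : Int))))).countP (fun e => e < k) with hc
  have hle : c ≤ ss.length := by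
    rw [hc, ← hlenE]; exact List.countP_le_length
  by_cases hceq : c = ss.length
  · rw [hloop, if_pos (by rw [List.length_map]; exact hceq), hbis, if_pos hceq]
  · have hclt : c < ss.length := by omega
    rw [hloop, if_neg (by rw [List.length_map]; exact hceq), hbis, if_neg hceq]
    simp only [zero_add]
    have hmatch :
        (match expected with
          | none => some ((c : Int))
          | some t =>
            if PySem.Chars.isIn t.toList ((PySem.List.pyGet? ss ((c : Int))).getD []) then some ((c : Int))
            else searchA ss t.toList ((c : Int)) (PySem.List.pyRange 1 20 1)) =
        (match expected with
          | none => some ((c : Int))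
          | some t =>
            if PySem.Chars.isIn t.toList ((PySem.List.pyGet? ss ((c : Int))).getD []) then some ((c : Int))
            else ((PySem.List.pyRange 1 20 1).flatMap (fun i => [((c : Int)) - i, ((c : Int)) + i])).find?
                   (fun j => decide (0 ≤ j) && decide (j < (ss.length : Int)) &&
                             PySem.Chars.isIn t.toList ((PySem.List.pyGet? ss j).getD []))) := by
      cases expected with
      | none => rfl
      | some t =>
        simp only []
        by_cases hin : PySem.Chars.isIn t.toList ((PySem.List.pyGet? ss ((c : Int))).getD []) = true
        · rw [if_pos hin, if_pos hin]
        · rw [if_neg hin, if_neg hin]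
          exact searchA_eq_find ss t.toList (c : Int) (by positivity) (by exact_mod_cast hclt)
            (PySem.List.pyRange 1 20 1)
            (fun i hi => ((PySem.List.mem_pyRange_one).mp hi).1)
    rw [hmatch]
    rfl


-- ===== VERDICT (by name: the statement is the Claim_ definition above) =====
theorem extract_sentence_with_trigger_spec : Claim_equal_extract_sentence_with_trigger := by
  intro doc_text trigger_span expected n_prior n_future doc_id _hdom _hpre
  unfold Spec_extract_sentence_with_trigger extract_sentence_with_trigger extract_sentence_with_trigger_alt
  exact pv_core (splitKeep [] doc_text.toList) trigger_span.1 expected n_prior n_future
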